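-- pv_equiv track=rewrite | github.com/ArthurKimura64/termooo | main.py | elaboraTermos
-- ===== SOURCE A (Python) =====
-- import collections
--
-- def elaboraTermos(possiveisRespostas, possiveisTermos):
--     resposta0 = []
--     resposta1 = []
--     resposta2 = []
--     resposta3 = []
--     resposta4 = []
--
--   #Cria pontuacao
--     for possivelResposta in possiveisRespostas:
--         resposta0.append(possivelResposta[0])
--         resposta1.append(possivelResposta[1])
--         resposta2.append(possivelResposta[2])
--         resposta3.append(possivelResposta[3])
--         resposta4.append(possivelResposta[4])
--     resposta0 = dict((collections.Counter(resposta0)))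
--     resposta1 = dict((collections.Counter(resposta1)))
--     resposta2 = dict((collections.Counter(resposta2)))
--     resposta3 = dict((collections.Counter(resposta3)))
--     resposta4 = dict((collections.Counter(resposta4)))
--     caractereRespostas = {}
--     for chave in resposta0.keys():
--         if chave in caractereRespostas.keys():
--             caractereRespostas[chave] += resposta0[chave]
--         else:
--             caractereRespostas[chave] = resposta0[chave]
--     for chave in resposta1.keys():
--         if chave in caractereRespostas.keys():
--             caractereRespostas[chave] += resposta1[chave]
--         else:
--             caractereRespostas[chave] = resposta1[chave]
--     for chave in resposta2.keys():
--         if chave in caractereRespostas.keys():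
--             caractereRespostas[chave] += resposta2[chave]
--         else:
--             caractereRespostas[chave] = resposta2[chave]
--     for chave in resposta3.keys():
--         if chave in caractereRespostas.keys():
--             caractereRespostas[chave] += resposta3[chave]
--         else:
--             caractereRespostas[chave] = resposta3[chave]
--     for chave in resposta4.keys():
--         if chave in caractereRespostas.keys():
--             caractereRespostas[chave] += resposta4[chave]
--         else:
--             caractereRespostas[chave] = resposta4[chave]
--   #Estabelece Pontuação
--     for index in range(len(possiveisTermos)):
--         letras = []
--         pontuacao = 0
--         for letra in possiveisTermos[index]:
--             if letra in letras:
--                 pontuacao += 0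
--             else:
--                 if letra in caractereRespostas.keys():
--                     pontuacao += caractereRespostas[letra]
--                 else:
--                     pontuacao += 0
--                 letras.append(letra)
--         possiveisTermos[index] = [possiveisTermos[index], pontuacao]
--
--     return possiveisTermos
-- ===== SOURCE B (Python) =====
-- def elaboraTermos(possiveisRespostas, possiveisTermos):
--     # One-pass aggregate frequency of the first five letters of every response.
--     caractereRespostas = {}
--     for resposta in possiveisRespostas:
--         for i in range(5):
--             letra = resposta[i]
--             caractereRespostas[letra] = caractereRespostas.get(letra, 0) + 1
--     # Score each term by the summed frequency of its distinct letters.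
--     for index in range(len(possiveisTermos)):
--         termo = possiveisTermos[index]
--         possiveisTermos[index] = [termo, sum(caractereRespostas.get(letra, 0) for letra in set(termo))]
--     return possiveisTermos
-- ===== Notes on version B (the rewrite author's own statement) =====
-- stated objective: simpler
-- what changed: The five per-position lists, five Counter dicts and five key-merge loops are replaced by one dict built in a single pass over the responses (explicitly indexing positions 0-4), and the per-term scoring fold with a seen-letters list becomes sum of frequencies over set(term).
import Mathlib
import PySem

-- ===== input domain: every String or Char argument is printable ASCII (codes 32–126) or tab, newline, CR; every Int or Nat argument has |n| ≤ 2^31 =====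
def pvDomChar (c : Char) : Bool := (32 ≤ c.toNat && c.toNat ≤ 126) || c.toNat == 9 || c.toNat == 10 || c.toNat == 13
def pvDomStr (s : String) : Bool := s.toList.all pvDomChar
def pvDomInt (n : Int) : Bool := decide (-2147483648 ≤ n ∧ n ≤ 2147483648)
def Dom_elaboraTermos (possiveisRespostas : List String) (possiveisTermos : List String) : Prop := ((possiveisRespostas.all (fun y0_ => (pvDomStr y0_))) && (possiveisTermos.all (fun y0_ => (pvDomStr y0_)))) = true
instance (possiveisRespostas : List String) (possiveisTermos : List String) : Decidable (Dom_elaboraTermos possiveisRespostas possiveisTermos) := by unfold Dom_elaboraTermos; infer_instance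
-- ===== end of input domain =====

-- B replaces A's five per-position lists/Counters and five merge loops by one counting
-- pass and sums frequencies over set(term); equivalence is about the RETURN value (A and B
-- both also overwrite the possiveisTermos list in place in Python).

-- ===== PORT A =====
-- the five merge loops 'for chave in r.keys(): …' share this shape
def pvMergeA (d : PySem.Dict Char Int) (r : PySem.Dict Char Int) : PySem.Dict Char Int :=
  r.keys.foldl (fun d chave =>
    if d.contains chave then d.insert chave (d.getD chave 0 + r.getD chave 0)
    else d.insert chave (r.getD chave 0)) d

def elaboraTermos (possiveisRespostas : List String) (possiveisTermos : List String) : List (String × Int) :=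
  -- first loop: build resposta0 … resposta4 (pyGetD total under Pre_: every response has ≥ 5 chars)
  let t := possiveisRespostas.foldl
    (fun (st : List Char × List Char × List Char × List Char × List Char) possivelResposta =>
      let l := possivelResposta.toList
      (st.1 ++ [PySem.List.pyGetD l 0 ' '],
       st.2.1 ++ [PySem.List.pyGetD l 1 ' '],
       st.2.2.1 ++ [PySem.List.pyGetD l 2 ' '],
       st.2.2.2.1 ++ [PySem.List.pyGetD l 3 ' '],
       st.2.2.2.2 ++ [PySem.List.pyGetD l 4 ' ']))
    ([], [], [], [], [])
  let resposta0 := PySem.Dict.counter t.1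
  let resposta1 := PySem.Dict.counter t.2.1
  let resposta2 := PySem.Dict.counter t.2.2.1
  let resposta3 := PySem.Dict.counter t.2.2.2.1
  let resposta4 := PySem.Dict.counter t.2.2.2.2
  let caractereRespostas :=
    pvMergeA (pvMergeA (pvMergeA (pvMergeA (pvMergeA PySem.Dict.empty resposta0) resposta1) resposta2) resposta3) resposta4
  -- scoring loop: possiveisTermos[index] = [possiveisTermos[index], pontuacao]
  possiveisTermos.map (fun termo =>
    let st := termo.toList.foldl (fun (st : List Char × Int) letra =>
      if letra ∈ st.1 then (st.1, st.2 + 0)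
      else if caractereRespostas.contains letra then (st.1 ++ [letra], st.2 + caractereRespostas.getD letra 0)
      else (st.1 ++ [letra], st.2 + 0)) ([], 0)
    (termo, st.2))

-- ===== PORT B =====
def elaboraTermos_alt (possiveisRespostas : List String) (possiveisTermos : List String) : List (String × Int) :=
  let caractereRespostas := possiveisRespostas.foldl
    (fun d resposta =>
      (PySem.List.pyRange 0 5 1).foldl (fun d i =>
        let letra := PySem.List.pyGetD resposta.toList i ' '
        d.insert letra (d.getD letra 0 + 1)) d)
    PySem.Dict.empty
  -- sum over set(termo): the sum is independent of the set's iteration order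
  possiveisTermos.map (fun termo =>
    (termo, ((PySem.Set.ofList termo.toList).map (fun letra => caractereRespostas.getD letra 0)).sum))

-- ===== PRECONDITION & SPEC =====
-- Pre_ excludes exactly the inputs where Python raises: a response shorter than 5 characters
-- makes possivelResposta[4] (A) / resposta[i] (B) an IndexError in both programs.
def Pre_elaboraTermos (possiveisRespostas : List String) (possiveisTermos : List String) : Prop :=
  ∀ s ∈ possiveisRespostas, 5 ≤ s.toList.length
instance (possiveisRespostas : List String) (possiveisTermos : List String) : Decidable (Pre_elaboraTermos possiveisRespostas possiveisTermos) := by unfold Pre_elaboraTermos; infer_instance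

def pvWitness_elaboraTermos : List String × List String := (["arose", "untie"], ["tares", "mamma", ""])

def Spec_elaboraTermos (possiveisRespostas : List String) (possiveisTermos : List String) (out : List (String × Int)) : Prop := out = elaboraTermos_alt possiveisRespostas possiveisTermos
instance (possiveisRespostas : List String) (possiveisTermos : List String) (out : List (String × Int)) : Decidable (Spec_elaboraTermos possiveisRespostas possiveisTermos out) := by unfold Spec_elaboraTermos; infer_instance

-- ===== CLAIM (what is proved, stated in full; the proofs are below) =====
def Claim_equal_elaboraTermos : Prop := ∀ (possiveisRespostas : List String) (possiveisTermos : List String), Dom_elaboraTermos possiveisRespostas possiveisTermos → Pre_elaboraTermos possiveisRespostas possiveisTermos → Spec_elaboraTermos possiveisRespostas possiveisTermos (elaboraTermos possiveisRespostas possiveisTermos)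

-- ===== LEMMAS AND PROOFS =====

-- the five characters A and B read from a response
def pvChars5 (s : String) : List Char :=
  [PySem.List.pyGetD s.toList 0 ' ', PySem.List.pyGetD s.toList 1 ' ',
   PySem.List.pyGetD s.toList 2 ' ', PySem.List.pyGetD s.toList 3 ' ',
   PySem.List.pyGetD s.toList 4 ' ']

theorem pv_fold5 (rs : List String) (a0 a1 a2 a3 a4 : List Char) :
    rs.foldl (fun (st : List Char × List Char × List Char × List Char × List Char) s =>
      let l := s.toList
      (st.1 ++ [PySem.List.pyGetD l 0 ' '],
       st.2.1 ++ [PySem.List.pyGetD l 1 ' '],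
       st.2.2.1 ++ [PySem.List.pyGetD l 2 ' '],
       st.2.2.2.1 ++ [PySem.List.pyGetD l 3 ' '],
       st.2.2.2.2 ++ [PySem.List.pyGetD l 4 ' ']))
      (a0, a1, a2, a3, a4)
    = (a0 ++ rs.map (fun s => PySem.List.pyGetD s.toList 0 ' '),
       a1 ++ rs.map (fun s => PySem.List.pyGetD s.toList 1 ' '),
       a2 ++ rs.map (fun s => PySem.List.pyGetD s.toList 2 ' '),
       a3 ++ rs.map (fun s => PySem.List.pyGetD s.toList 3 ' '),
       a4 ++ rs.map (fun s => PySem.List.pyGetD s.toList 4 ' ')) := by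
  induction rs generalizing a0 a1 a2 a3 a4 with
  | nil => simp
  | cons s rs ih => simp [List.foldl_cons, ih, List.append_assoc]

theorem pv_merge_getD (ks : List Char) (r d : PySem.Dict Char Int) (hnd : ks.Nodup) (c : Char) :
    (ks.foldl (fun d chave =>
      if d.contains chave then d.insert chave (d.getD chave 0 + r.getD chave 0)
      else d.insert chave (r.getD chave 0)) d).getD c 0
    = d.getD c 0 + (if c ∈ ks then r.getD c 0 else 0) := by
  induction ks generalizing d with
  | nil => simp
  | cons k ks ih =>
    have hstep : (if d.contains k then d.insert k (d.getD k 0 + r.getD k 0)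
        else d.insert k (r.getD k 0)) = d.insert k (d.getD k 0 + r.getD k 0) := by
      by_cases h : d.contains k = true
      · simp [h]
      · simp [h, PySem.Dict.getD_of_not_contains d 0 (by simpa using h)]
    rw [List.foldl_cons, hstep, ih _ (List.Nodup.of_cons hnd)]
    rcases List.nodup_cons.mp hnd with ⟨hk, _⟩
    by_cases hc : c ∈ ks
    · have hck : c ≠ k := fun h => hk (h ▸ hc)
      simp [hc, hck, PySem.Dict.getD_insert]
    · by_cases hck : c = k
      · subst hck; simp [hc]
      · simp [hc, hck, PySem.Dict.getD_insert]

theorem pv_merge_counter_getD (xs : List Char) (d : PySem.Dict Char Int) (c : Char) :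
    (pvMergeA d (PySem.Dict.counter xs)).getD c 0 = d.getD c 0 + xs.count c := by
  rw [pvMergeA, PySem.Dict.keys_counter,
      pv_merge_getD _ _ _ (PySem.Set.nodup_ofList xs) c]
  by_cases hc : c ∈ xs
  · simp [PySem.Set.mem_ofList, hc, PySem.Dict.getD_counter]
  · simp [PySem.Set.mem_ofList, hc, List.count_eq_zero_of_not_mem hc]

theorem pv_freq_getD (rs : List String) (d : PySem.Dict Char Int) (c : Char) :
    (rs.foldl (fun d resposta =>
      (PySem.List.pyRange 0 5 1).foldl (fun d i =>
        let letra := PySem.List.pyGetD resposta.toList i ' '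
        d.insert letra (d.getD letra 0 + 1)) d) d).getD c 0
    = d.getD c 0 + ((rs.map (fun s => ((pvChars5 s).count c : Int))).sum) := by
  induction rs generalizing d with
  | nil => simp
  | cons s rs ih =>
    rw [List.foldl_cons, ih]
    have hinner : (PySem.List.pyRange 0 5 1).foldl (fun d i =>
        let letra := PySem.List.pyGetD s.toList i ' '
        d.insert letra (d.getD letra 0 + 1)) d
        = (pvChars5 s).foldl (fun d x => d.insert x (d.getD x 0 + 1)) d := by
      rw [show PySem.List.pyRange 0 5 1 = [0, 1, 2, 3, 4] from by decide]
      simp [pvChars5]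
    rw [hinner, PySem.Dict.getD_foldl_insert_add_one]
    simp [add_assoc]

-- the five position-wise counts sum to the per-response counts
theorem pv_count5 (rs : List String) (c : Char) :
    ((rs.map (fun s => PySem.List.pyGetD s.toList 0 ' ')).count c
     + (rs.map (fun s => PySem.List.pyGetD s.toList 1 ' ')).count c
     + (rs.map (fun s => PySem.List.pyGetD s.toList 2 ' ')).count c
     + (rs.map (fun s => PySem.List.pyGetD s.toList 3 ' ')).count c
     + (rs.map (fun s => PySem.List.pyGetD s.toList 4 ' ')).count c : Int)
    = (rs.map (fun s => ((pvChars5 s).count c : Int))).sum := by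
  have hnat : (rs.map (fun s => PySem.List.pyGetD s.toList 0 ' ')).count c
      + (rs.map (fun s => PySem.List.pyGetD s.toList 1 ' ')).count c
      + (rs.map (fun s => PySem.List.pyGetD s.toList 2 ' ')).count c
      + (rs.map (fun s => PySem.List.pyGetD s.toList 3 ' ')).count c
      + (rs.map (fun s => PySem.List.pyGetD s.toList 4 ' ')).count c
      = (rs.map (fun s => (pvChars5 s).count c)).sum := by
    induction rs with
    | nil => simp
    | cons s rs ih =>
      simp only [List.map_cons, List.count_cons, List.sum_cons]
      rw [← ih]
      have h5 : (pvChars5 s).count c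
          = ((((if PySem.List.pyGetD s.toList 4 ' ' == c then 1 else 0)
            + if PySem.List.pyGetD s.toList 3 ' ' == c then 1 else 0)
            + if PySem.List.pyGetD s.toList 2 ' ' == c then 1 else 0)
            + if PySem.List.pyGetD s.toList 1 ' ' == c then 1 else 0)
            + if PySem.List.pyGetD s.toList 0 ' ' == c then 1 else 0 := by
        simp [pvChars5, List.count_cons]
      rw [h5]
      split_ifs <;> omega
  rw [show (fun s => ((pvChars5 s).count c : Int))
        = (fun x : Nat => (x : Int)) ∘ (fun s => (pvChars5 s).count c) from rfl,
      ← List.map_map, ← Nat.cast_list_sum]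
  exact_mod_cast hnat

-- the aggregated dictionaries of A and B agree on every lookup
theorem pv_dicts_agree (rs : List String) (c : Char) :
    (pvMergeA (pvMergeA (pvMergeA (pvMergeA (pvMergeA PySem.Dict.empty
        (PySem.Dict.counter (rs.map (fun s => PySem.List.pyGetD s.toList 0 ' '))))
        (PySem.Dict.counter (rs.map (fun s => PySem.List.pyGetD s.toList 1 ' '))))
        (PySem.Dict.counter (rs.map (fun s => PySem.List.pyGetD s.toList 2 ' '))))
        (PySem.Dict.counter (rs.map (fun s => PySem.List.pyGetD s.toList 3 ' '))))
        (PySem.Dict.counter (rs.map (fun s => PySem.List.pyGetD s.toList 4 ' ')))).getD c 0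
    = (rs.foldl (fun d resposta =>
        (PySem.List.pyRange 0 5 1).foldl (fun d i =>
          let letra := PySem.List.pyGetD resposta.toList i ' '
          d.insert letra (d.getD letra 0 + 1)) d) PySem.Dict.empty).getD c 0 := by
  rw [pv_freq_getD, pv_merge_counter_getD, pv_merge_counter_getD, pv_merge_counter_getD,
      pv_merge_counter_getD, pv_merge_counter_getD]
  simp [← pv_count5, add_assoc]

-- A's scoring fold, with the seen-letters list generalized
theorem pv_scoreA (d : PySem.Dict Char Int) (cs ls : List Char) (p : Int) :
    cs.foldl (fun (st : List Char × Int) letra =>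
      if letra ∈ st.1 then (st.1, st.2 + 0)
      else if d.contains letra then (st.1 ++ [letra], st.2 + d.getD letra 0)
      else (st.1 ++ [letra], st.2 + 0)) (ls, p)
    = (PySem.Set.update ls cs,
       p + ((PySem.Set.update ls cs).map (fun c => d.getD c 0)).sum - (ls.map (fun c => d.getD c 0)).sum) := by
  induction cs generalizing ls p with
  | nil => simp [PySem.Set.update_nil]
  | cons c cs ih =>
    rw [List.foldl_cons, PySem.Set.update_cons]
    by_cases hc : c ∈ ls
    · rw [if_pos hc, show ((ls, p + 0) : List Char × Int) = (ls, p) from by rw [add_zero],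
          ih, PySem.Set.add_of_mem hc]
    · have hstep : (if c ∈ ls then (ls, p + 0)
          else if d.contains c then (ls ++ [c], p + d.getD c 0)
          else (ls ++ [c], p + 0)) = (ls ++ [c], p + d.getD c 0) := by
        by_cases h : d.contains c = true
        · simp [hc, h]
        · simp [hc, h, PySem.Dict.getD_of_not_contains d 0 (by simpa using h)]
      rw [hstep, PySem.Set.add_of_not_mem hc, ih, Prod.mk.injEq]
      refine ⟨rfl, ?_⟩
      simp only [List.map_append, List.map_cons, List.map_nil, List.sum_append, List.sum_cons,
        List.sum_nil, add_zero]
      ring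

theorem elaboraTermos_eq_alt (possiveisRespostas possiveisTermos : List String) :
    elaboraTermos possiveisRespostas possiveisTermos
      = elaboraTermos_alt possiveisRespostas possiveisTermos := by
  rw [elaboraTermos, elaboraTermos_alt, pv_fold5]
  refine List.map_congr_left (fun termo _ => ?_)
  simp only [List.nil_append]
  rw [pv_scoreA]
  have hupd : PySem.Set.update ([] : List Char) termo.toList = PySem.Set.ofList termo.toList := by
    rw [PySem.Set.ofList_eq_foldl]; rfl
  rw [hupd]
  simp only [List.map_nil, List.sum_nil, sub_zero, zero_add]
  rw [Prod.mk.injEq]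
  refine ⟨rfl, ?_⟩
  refine congrArg List.sum (List.map_congr_left fun c _ => ?_)
  exact pv_dicts_agree possiveisRespostas c

-- ===== VERDICT (by name: the statement is the Claim_ definition above) =====
theorem elaboraTermos_spec : Claim_equal_elaboraTermos := by
  intro pr pt _ _
  unfold Spec_elaboraTermos
  exact elaboraTermos_eq_alt pr pt
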